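-- pv_equiv track=rewrite | github.com/Horizon-Sunshine/CyberCom-Cryptography-Toolkit | Final_Project_CyberCom.py | generate_shift_table
-- ===== SOURCE A (Python) =====
-- def generate_shift_table(ciphertext):
--     keys, jumps = range(26), range(26)
--     shift_table = []
--     for key in keys:
--         for jump in jumps:
--             result = ""
--             for i in range(len(ciphertext)):
--                 c = ciphertext[i]
--                 if c.isupper():
--                     result += chr((ord(c) - key - jump * i - 65) % 26 + 65)
--                 elif c.islower():
--                     result += chr((ord(c) - key - jump * i - 97) % 26 + 97)
--                 else:
--                     result += c
--             shift_table.append((key, jump, result))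
--     return shift_table
-- ===== SOURCE B (Python) =====
-- def generate_shift_table(ciphertext):
--     def dec(c, s):
--         if c.isupper():
--             return chr((ord(c) - s - 65) % 26 + 65)
--         if c.islower():
--             return chr((ord(c) - s - 97) % 26 + 97)
--         return c
--     # per-position table: T[i][s] = decryption of ciphertext[i] under total shift s
--     T = [[dec(c, s) for s in range(26)] for c in ciphertext]
--     table = []
--     for key in range(26):
--         for jump in range(26):
--             table.append((key, jump,
--                           ''.join(row[(key + jump * i) % 26] for i, row in enumerate(T))))
--     return table
-- ===== Notes on version B (the rewrite author's own statement) =====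
-- stated objective: alternative
-- what changed: B precomputes a 26-entry decryption table per ciphertext position once, then each of the 676 (key, jump) rows is assembled by table lookup at shift (key+jump*i)%26 instead of recomputing the character arithmetic per row and position.
import Mathlib
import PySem

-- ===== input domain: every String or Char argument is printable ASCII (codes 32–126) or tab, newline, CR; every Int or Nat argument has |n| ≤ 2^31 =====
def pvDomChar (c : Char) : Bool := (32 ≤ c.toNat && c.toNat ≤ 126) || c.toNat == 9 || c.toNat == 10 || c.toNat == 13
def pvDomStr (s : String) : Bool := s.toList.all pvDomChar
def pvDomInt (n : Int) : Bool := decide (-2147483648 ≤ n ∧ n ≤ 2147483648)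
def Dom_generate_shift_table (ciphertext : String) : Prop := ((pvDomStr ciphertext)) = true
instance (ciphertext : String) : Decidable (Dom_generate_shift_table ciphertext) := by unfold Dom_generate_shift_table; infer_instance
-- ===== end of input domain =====

-- B precomputes a per-position 26-entry decryption table once and assembles each of the
-- 676 rows by table lookup instead of per-row modular arithmetic (alternative decomposition).

-- ===== PORT A =====
def generate_shift_table (ciphertext : String) : List (Int × Int × String) :=
  (PySem.List.pyRange 0 26 1).foldl (fun shift_table key =>
    (PySem.List.pyRange 0 26 1).foldl (fun shift_table jump =>
      let result : List Char :=
        (PySem.List.pyRange 0 (PySem.Str.len ciphertext) 1).foldl (fun result i =>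
          let c := (PySem.Str.pyGet? ciphertext i).getD ' '
          result ++
            (if PySem.Chars.isupper c then
              [Char.ofNat (PySem.Int.mod ((c.toNat : Int) - key - jump * i - 65) 26 + 65).toNat]
            else if PySem.Chars.islower c then
              [Char.ofNat (PySem.Int.mod ((c.toNat : Int) - key - jump * i - 97) 26 + 97).toNat]
            else [c])) []
      shift_table ++ [(key, jump, String.mk result)]) shift_table) []

-- ===== PORT B =====
-- dec(c, s): decryption of character c under total shift s
def pvDecChar (c : Char) (s : Int) : Char :=
  if PySem.Chars.isupper c then
    Char.ofNat (PySem.Int.mod ((c.toNat : Int) - s - 65) 26 + 65).toNat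
  else if PySem.Chars.islower c then
    Char.ofNat (PySem.Int.mod ((c.toNat : Int) - s - 97) 26 + 97).toNat
  else c

def generate_shift_table_alt (ciphertext : String) : List (Int × Int × String) :=
  let T : List (List Char) :=
    ciphertext.toList.map (fun c => (PySem.List.pyRange 0 26 1).map (fun s => pvDecChar c s))
  (PySem.List.pyRange 0 26 1).foldl (fun table key =>
    (PySem.List.pyRange 0 26 1).foldl (fun table jump =>
      table ++ [(key, jump, String.mk
        ((PySem.List.enumerate T 0).map (fun p =>
          PySem.List.pyGetD p.2 (PySem.Int.mod (key + jump * p.1) 26) ' ')))]) table) []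

-- ===== PRECONDITION & SPEC =====
def Spec_generate_shift_table (ciphertext : String) (out : List (Int × Int × String)) : Prop := out = generate_shift_table_alt ciphertext
instance (ciphertext : String) (out : List (Int × Int × String)) : Decidable (Spec_generate_shift_table ciphertext out) := by unfold Spec_generate_shift_table; infer_instance

-- ===== CLAIM (what is proved, stated in full; the proofs are below) =====
def Claim_equal_generate_shift_table : Prop := ∀ (ciphertext : String), Dom_generate_shift_table ciphertext → Spec_generate_shift_table ciphertext (generate_shift_table ciphertext)

-- ===== LEMMAS AND PROOFS =====

-- the pointwise character identity: shifting by key + jump*i equals shifting by (key + jump*i) % 26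
lemma pvDecChar_eq (c : Char) (key jump i : Int) :
    pvDecChar c (PySem.Int.mod (key + jump * i) 26) =
      (if PySem.Chars.isupper c then
        Char.ofNat (PySem.Int.mod ((c.toNat : Int) - key - jump * i - 65) 26 + 65).toNat
      else if PySem.Chars.islower c then
        Char.ofNat (PySem.Int.mod ((c.toNat : Int) - key - jump * i - 97) 26 + 97).toNat
      else c) := by
  unfold pvDecChar
  simp only [PySem.Int.mod_eq_emod_of_pos (by norm_num : (0:Int) < 26)]
  split_ifs with h1 h2
  · congr 1; omega
  · congr 1; omega
  · rfl

-- a flatMap of singletons is a map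
lemma pvFlatMapSingleton {α β : Type} (g : α → β) (l : List α) :
    l.flatMap (fun x => [g x]) = l.map g := by
  induction l with
  | nil => rfl
  | cons a t ih => simp [List.flatMap_cons, ih]

-- the inner row strings coincide for every key and jump
lemma pvRow_eq (ciphertext : String) (key jump : Int) :
    (PySem.List.enumerate
        (ciphertext.toList.map (fun c => (PySem.List.pyRange 0 26 1).map (fun s => pvDecChar c s))) 0).map
      (fun p => PySem.List.pyGetD p.2 (PySem.Int.mod (key + jump * p.1) 26) ' ') =
    (PySem.List.pyRange 0 (PySem.Str.len ciphertext) 1).foldl (fun result i =>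
      let c := (PySem.Str.pyGet? ciphertext i).getD ' '
      result ++
        (if PySem.Chars.isupper c then
          [Char.ofNat (PySem.Int.mod ((c.toNat : Int) - key - jump * i - 65) 26 + 65).toNat]
        else if PySem.Chars.islower c then
          [Char.ofNat (PySem.Int.mod ((c.toNat : Int) - key - jump * i - 97) 26 + 97).toNat]
        else [c])) [] := by
  rw [PySem.List.foldl_append_eq_flatMap, PySem.List.enumerate_eq_map_pyRange _ ([] : List Char),
      List.map_map]
  have hlen : PySem.List.len (ciphertext.toList.map
      (fun c => (PySem.List.pyRange 0 26 1).map (fun s => pvDecChar c s))) =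
      PySem.Str.len ciphertext := by
    simp [PySem.List.len, PySem.Str.len_eq]
  rw [hlen, List.nil_append]
  rw [show (fun i =>
        if PySem.Chars.isupper ((PySem.Str.pyGet? ciphertext i).getD ' ') = true then
          [Char.ofNat (PySem.Int.mod (((PySem.Str.pyGet? ciphertext i).getD ' ').toNat - key - jump * i - 65) 26 + 65).toNat]
        else if PySem.Chars.islower ((PySem.Str.pyGet? ciphertext i).getD ' ') = true then
          [Char.ofNat (PySem.Int.mod (((PySem.Str.pyGet? ciphertext i).getD ' ').toNat - key - jump * i - 97) 26 + 97).toNat]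
        else [(PySem.Str.pyGet? ciphertext i).getD ' ']) =
      (fun i : Int =>
        [if PySem.Chars.isupper ((PySem.Str.pyGet? ciphertext i).getD ' ') = true then
          Char.ofNat (PySem.Int.mod (((PySem.Str.pyGet? ciphertext i).getD ' ').toNat - key - jump * i - 65) 26 + 65).toNat
        else if PySem.Chars.islower ((PySem.Str.pyGet? ciphertext i).getD ' ') = true then
          Char.ofNat (PySem.Int.mod (((PySem.Str.pyGet? ciphertext i).getD ' ').toNat - key - jump * i - 97) 26 + 97).toNat
        else (PySem.Str.pyGet? ciphertext i).getD ' '])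
    from by funext i; split_ifs <;> rfl, pvFlatMapSingleton]
  refine List.map_congr_left (fun j hj => ?_)
  rw [PySem.List.mem_pyRange_one] at hj
  obtain ⟨h0, h1⟩ := hj
  rw [PySem.Str.len_eq] at h1
  have hj' : j < ((ciphertext.toList.map
      (fun c => (PySem.List.pyRange 0 26 1).map (fun s => pvDecChar c s))).length : Int) := by
    simpa using h1
  have hmod0 : 0 ≤ PySem.Int.mod (key + jump * j) 26 := by
    rw [PySem.Int.mod_eq_emod_of_pos (by norm_num)]; omega
  have hmod1 : PySem.Int.mod (key + jump * j) 26 < 26 := by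
    rw [PySem.Int.mod_eq_emod_of_pos (by norm_num)]; omega
  rw [Function.comp_apply, PySem.List.pyGetD_eq_getElem _ _ h0 hj', List.getElem_map,
      PySem.List.pyGetD_map_pyRange_of_nonneg _ _ _ _ hmod0 hmod1, pvDecChar_eq]
  have hc : (PySem.Str.pyGet? ciphertext j).getD ' ' = ciphertext.toList[j.toNat] := by
    rw [show (PySem.Str.pyGet? ciphertext j).getD ' ' =
        PySem.List.pyGetD ciphertext.toList j ' ' from rfl,
      PySem.List.pyGetD_eq_getElem _ _ h0 (by simpa using h1)]
  rw [hc]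

theorem generate_shift_table_spec : Claim_equal_generate_shift_table := by
  intro ciphertext _
  unfold Spec_generate_shift_table generate_shift_table generate_shift_table_alt
  simp only [pvRow_eq]
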